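-- pv_equiv track=rewrite | github.com/woletee/1D_ARC | src/backend/generate.py | move_dp
-- ===== SOURCE A (Python) =====
-- def move_dp(arr):
--     if not arr:
--         return arr
--     new_arr = [0] * len(arr)
--     non_zeros = [x for x in arr if x != 0]
--     last_non_zero_idx = len(arr) - 1
--     while last_non_zero_idx >= 0 and arr[last_non_zero_idx] == 0:
--         last_non_zero_idx -= 1
--     start_index = last_non_zero_idx + 1 - len(non_zeros)
--     for i in range(start_index, start_index + len(non_zeros)):
--         new_arr[i] = non_zeros.pop(0) if non_zeros else 0
--     return new_arr
-- ===== SOURCE B (Python) =====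
-- def move_dp(arr):
--     nz = []
--     t = 0  # length of the current trailing run of zeros
--     for x in arr:
--         if x != 0:
--             nz.append(x)
--             t = 0
--         else:
--             t += 1
--     return [0] * (len(arr) - t - len(nz)) + nz + [0] * t
-- ===== Notes on version B (the rewrite author's own statement) =====
-- stated objective: faster
-- what changed: One forward pass collects the non-zeros and the trailing-zero run length and the result is built by concatenating three segments, replacing A's backward index scan plus in-place placement loop that pops from the front of the non-zeros list.
import Mathlib
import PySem

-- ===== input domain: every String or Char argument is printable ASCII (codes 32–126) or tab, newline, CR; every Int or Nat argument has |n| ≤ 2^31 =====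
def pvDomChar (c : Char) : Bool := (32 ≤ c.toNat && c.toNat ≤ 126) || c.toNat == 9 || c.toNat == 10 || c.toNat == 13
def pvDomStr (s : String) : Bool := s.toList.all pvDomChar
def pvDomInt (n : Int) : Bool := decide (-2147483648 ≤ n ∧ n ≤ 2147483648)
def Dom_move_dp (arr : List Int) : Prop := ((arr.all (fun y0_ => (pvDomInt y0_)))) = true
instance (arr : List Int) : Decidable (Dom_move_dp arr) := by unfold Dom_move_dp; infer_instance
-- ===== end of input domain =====

-- B builds the answer by one forward pass plus concatenation of three segments (simpler decomposition).

-- ===== PORT A =====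
-- the backward 'while last_non_zero_idx >= 0 and arr[last_non_zero_idx] == 0' loop
def lastLoop (arr : List Int) (i : Int) : Int :=
  if h : 0 ≤ i ∧ PySem.List.pyGetD arr i 0 = 0 then lastLoop arr (i - 1) else i
termination_by (i + 1).toNat
decreasing_by omega

def move_dp (arr : List Int) : List Int :=
  if arr = [] then arr
  else
    let newArr := List.replicate arr.length (0 : Int)
    let nonZeros := arr.filter (fun x => x ≠ 0)
    let lastIdx := lastLoop arr ((arr.length : Int) - 1)
    let start := lastIdx + 1 - nonZeros.length
    let res := (PySem.List.pyRange start (start + nonZeros.length) 1).foldl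
      (fun (st : List Int × List Int) i =>
        match st.2 with
        | [] => (PySem.List.pySetD st.1 i 0, [])
        | v :: rest => (PySem.List.pySetD st.1 i v, rest))
      (newArr, nonZeros)
    res.1

-- ===== PORT B =====
def move_dp_alt (arr : List Int) : List Int :=
  let st := arr.foldl
    (fun (st : List Int × Int) x =>
      if x ≠ 0 then (st.1 ++ [x], 0) else (st.1, st.2 + 1))
    ([], 0)
  List.replicate ((arr.length : Int) - st.2 - st.1.length).toNat 0
    ++ st.1 ++ List.replicate st.2.toNat 0

-- ===== PRECONDITION & SPEC =====
def Spec_move_dp (arr : List Int) (out : List Int) : Prop := out = move_dp_alt arr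
instance (arr : List Int) (out : List Int) : Decidable (Spec_move_dp arr out) := by unfold Spec_move_dp; infer_instance

-- ===== CLAIM (what is proved, stated in full; the proofs are below) =====
def Claim_equal_move_dp : Prop := ∀ (arr : List Int), Dom_move_dp arr → Spec_move_dp arr (move_dp arr)

-- ===== LEMMAS AND PROOFS =====

-- length of the trailing run of zeros
def tzc (l : List Int) : Nat := (l.reverse.takeWhile (fun x => x == 0)).length

theorem tzc_nil : tzc [] = 0 := rfl

theorem tzc_append (l : List Int) (x : Int) :
    tzc (l ++ [x]) = if x = 0 then tzc l + 1 else 0 := by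
  unfold tzc
  simp only [List.reverse_append, List.reverse_singleton, List.singleton_append,
    List.takeWhile_cons]
  by_cases hx : x = 0 <;> simp [hx]

theorem tzc_add_filter_le (l : List Int) :
    tzc l + (l.filter (fun x => x ≠ 0)).length ≤ l.length := by
  induction l using List.reverseRecOn with
  | nil => simp [tzc_nil]
  | append_singleton l x ih =>
    rw [tzc_append]
    by_cases hx : x = 0 <;>
      simp only [hx, if_true, if_false, List.filter_append, List.length_append] <;>
      simp [hx, List.filter] at * <;> omega

-- B's fold computes (filter, trailing-zero count)
theorem foldB (l : List Int) :
    l.foldl (fun (st : List Int × Int) x =>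
        if x ≠ 0 then (st.1 ++ [x], 0) else (st.1, st.2 + 1)) ([], 0)
      = (l.filter (fun x => x ≠ 0), (tzc l : Int)) := by
  induction l using List.reverseRecOn with
  | nil => simp [tzc_nil]
  | append_singleton l x ih =>
    rw [List.foldl_append, ih, tzc_append]
    by_cases hx : x = 0 <;> simp [hx, List.filter_append]

theorem lastLoop_append (l : List Int) (x : Int) :
    ∀ (m : Nat) (i : Int), (i + 1).toNat ≤ m → i < (l.length : Int) →
      lastLoop (l ++ [x]) i = lastLoop l i := by
  intro m
  induction m with
  | zero =>
    intro i hm hi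
    have h0 : ¬ (0 ≤ i) := by omega
    conv_lhs => rw [lastLoop]
    conv_rhs => rw [lastLoop]
    simp [h0]
  | succ k ih =>
    intro i hm hi
    conv_lhs => rw [lastLoop]
    conv_rhs => rw [lastLoop]
    by_cases h0 : 0 ≤ i
    · have hget : PySem.List.pyGetD (l ++ [x]) i 0 = PySem.List.pyGetD l i 0 := by
        rw [PySem.List.pyGetD_eq_getElem (l ++ [x]) 0 h0 (by simp; omega),
            PySem.List.pyGetD_eq_getElem l 0 h0 (by omega)]
        rw [List.getElem_append_left (by omega)]
      rw [hget]
      by_cases hc : PySem.List.pyGetD l i 0 = 0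
      · rw [dif_pos ⟨h0, hc⟩, dif_pos ⟨h0, hc⟩]
        exact ih (i - 1) (by omega) (by omega)
      · rw [dif_neg (by tauto), dif_neg (by tauto)]
    · rw [dif_neg (by tauto), dif_neg (by tauto)]

theorem lastLoop_eq (l : List Int) :
    lastLoop l ((l.length : Int) - 1) = (l.length : Int) - 1 - tzc l := by
  induction l using List.reverseRecOn with
  | nil =>
    rw [lastLoop]; simp [tzc_nil]
  | append_singleton l x ih =>
    have hlen : ((l ++ [x]).length : Int) - 1 = (l.length : Int) := by simp
    rw [hlen, lastLoop]
    have hget : PySem.List.pyGetD (l ++ [x]) (l.length : Int) 0 = x := by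
      rw [PySem.List.pyGetD_eq_getElem (l ++ [x]) 0 (by omega) (by simp)]
      simp
    by_cases hx : x = 0
    · rw [dif_pos ⟨Int.natCast_nonneg _, by rw [hget, hx]⟩]
      have hdec : (l.length : Int) - 1 + 1 = ((l.length : Int) + 1).toNat - 1 + 1 - 1 := by omega
      rw [lastLoop_append l x (l.length : Int).toNat ((l.length : Int) - 1) (by omega) (by omega), ih,
        tzc_append]
      simp [hx]
      ring
    · rw [dif_neg (by rw [hget]; tauto)]
      rw [tzc_append]
      simp [hx]

-- the fill loop writes 'rem' into positions s .. s+|rem|-1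
theorem fillLoop (rem : List Int) : ∀ (na : List Int) (s : Nat),
    s + rem.length ≤ na.length →
    ((PySem.List.pyRange (s : Int) ((s : Int) + rem.length) 1).foldl
      (fun (st : List Int × List Int) i =>
        match st.2 with
        | [] => (PySem.List.pySetD st.1 i 0, [])
        | v :: rest => (PySem.List.pySetD st.1 i v, rest))
      (na, rem)).1
    = na.take s ++ rem ++ na.drop (s + rem.length) := by
  induction rem with
  | nil =>
    intro na s h
    rw [PySem.List.pyRange_one_eq_nil (by simp)]
    simp
  | cons v rest ih =>
    intro na s h
    rw [PySem.List.pyRange_one_cons (by push_cast [List.length_cons]; omega)]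
    simp only [List.foldl_cons]
    have hset : PySem.List.pySetD na (s : Int) v = na.set s v :=
      PySem.List.pySetD_natCast na s v
    have hcast : (s : Int) + 1 = ((s + 1 : Nat) : Int) := by push_cast; ring
    have hend : (s : Int) + ((v :: rest).length : Int)
        = ((s + 1 : Nat) : Int) + (rest.length : Int) := by push_cast; simp; ring
    rw [hset, hend, hcast, ih (na.set s v) (s + 1) (by simp at h ⊢; omega)]
    have hs : s < na.length := by simp at h; omega
    have hidx : s + 1 + rest.length = s + (v :: rest).length := by simp; omega
    have h2 : (na.set s v).drop (s + 1 + rest.length) = na.drop (s + 1 + rest.length) := by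
      rw [List.drop_set, if_pos (by omega)]
    have h1 : (na.set s v).take (s + 1) = na.take s ++ [v] := by
      apply List.ext_getElem
      · simp; omega
      · intro k hk1 hk2
        rw [List.getElem_take, List.getElem_set]
        simp only [List.length_take, List.length_set] at hk1
        rcases Nat.lt_or_ge k s with hks | hks
        · rw [if_neg (by omega), List.getElem_append_left (by simp; omega)]
          rw [List.getElem_take]
        · have hk : k = s := by omega
          subst hk
          rw [if_pos rfl, List.getElem_append_right (by simp [Nat.min_eq_left (Nat.le_of_lt hs)])]
          simp
    rw [h1, h2, hidx]
    simp

-- ===== VERDICT (by name: the statement is the Claim_ definition above) =====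
theorem move_dp_spec : Claim_equal_move_dp := by
  intro arr _
  unfold Spec_move_dp move_dp move_dp_alt
  rw [foldB]
  by_cases he : arr = []
  · simp [he, tzc_nil]
  · simp only [he, if_false]
    set n := arr.length with hn
    set nz := arr.filter (fun x => x ≠ 0) with hnz
    set t := tzc arr with ht
    have hle : t + nz.length ≤ n := tzc_add_filter_le arr
    have hll := lastLoop_eq arr
    set s : Nat := n - t - nz.length with hs
    have hstart : lastLoop arr ((n : Int) - 1) + 1 - (nz.length : Int) = (s : Int) := by
      rw [hll]; omega
    simp only [hstart]
    rw [fillLoop nz (List.replicate n 0) s (by simp; omega)]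
    have h1 : (List.replicate n (0 : Int)).take s = List.replicate s 0 := by
      rw [List.take_replicate]; congr 1; omega
    have h2 : (List.replicate n (0 : Int)).drop (s + nz.length) = List.replicate t 0 := by
      rw [List.drop_replicate]; congr 1; omega
    have h3 : ((n : Int) - (t : Int) - (nz.length : Int)).toNat = s := by omega
    have h4 : ((t : Int)).toNat = t := by omega
    rw [h1, h2, h3, h4]
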